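-- pv_equiv track=rewrite | github.com/kragen/watchdog | webapp.py | divide_into_ranges
-- ===== SOURCE A (Python) =====
-- def divide_into_ranges(ints):
--     """Summarize a sorted sequence of ints as a sequence of contiguous ranges.
--
--     Return value is a list of lists of the form `[start, stop]`, where `stop`
--     is one more than the last item in the range.
--     """
--     rv = []
--
--     for item in ints:
--         if len(rv) == 0:
--             rv.append([item, item+1])
--         elif item == rv[-1][1]:
--             rv[-1][1] += 1
--         else:
--             rv.append([item, item+1])
--
--     return rv
-- ===== SOURCE B (Python) =====
-- from itertools import groupby
--
--
-- def divide_into_ranges(ints):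
--     """Summarize a sorted sequence of ints as a sequence of contiguous ranges."""
--     rv = []
--     for _, group in groupby(enumerate(ints), key=lambda pair: pair[1] - pair[0]):
--         values = [value for _, value in group]
--         rv.append([values[0], values[-1] + 1])
--     return rv
-- ===== Notes on version B (the rewrite author's own statement) =====
-- stated objective: idiomatic
-- what changed: Replaces A's incremental extend-the-last-range-or-append accumulator loop with the standard itertools.groupby idiom keyed on value - index, emitting [first, last+1] per group.
import Mathlib
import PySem

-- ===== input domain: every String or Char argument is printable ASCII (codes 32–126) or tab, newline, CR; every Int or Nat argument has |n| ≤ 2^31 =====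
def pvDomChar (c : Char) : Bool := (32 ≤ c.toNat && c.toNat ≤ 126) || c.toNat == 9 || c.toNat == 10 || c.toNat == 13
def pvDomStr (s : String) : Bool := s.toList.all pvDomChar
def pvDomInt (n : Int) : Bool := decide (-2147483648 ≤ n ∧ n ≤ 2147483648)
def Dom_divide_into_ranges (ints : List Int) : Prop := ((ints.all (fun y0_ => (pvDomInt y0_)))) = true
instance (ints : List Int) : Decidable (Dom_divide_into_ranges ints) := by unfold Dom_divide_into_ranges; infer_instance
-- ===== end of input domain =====

-- B replaces A's extend-last-range-or-append loop with the idiomatic groupby-on-(value - index)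
-- decomposition (itertools.groupby); objective: idiomatic, same O(n) cost, same return value.

-- ===== PORT A =====
-- A's loop: rv starts empty; each item either starts a new range or bumps rv[-1][1].
-- rv[-1][1] += 1 is transliterated as "replace the last element" (dropLast ++ [updated last]).
def pvStepA (rv : List (List Int)) (item : Int) : List (List Int) :=
  match rv.getLast? with
  | none => rv ++ [[item, item + 1]]
  | some last =>
      if item = last.getD 1 0 then
        rv.dropLast ++ [[last.getD 0 0, last.getD 1 0 + 1]]
      else
        rv ++ [[item, item + 1]]

def divide_into_ranges (ints : List Int) : List (List Int) :=
  ints.foldl pvStepA []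

-- ===== PORT B =====
-- enumerate(ints), ported by hand (exact: pairs (index, value) starting at 0)
def pvEnumFrom (i : Nat) : List Int → List (Nat × Int)
  | [] => []
  | x :: xs => (i, x) :: pvEnumFrom (i + 1) xs

-- groupby(..., key = value - index): consume pairs left to right, keeping the current
-- group's key and its list of values; a key change closes the group.
def pvGroupsB (key : Int) (run : List Int) : List (Nat × Int) → List (List Int)
  | [] => [run]
  | (i, y) :: rest =>
      if y - (i : Int) = key then pvGroupsB key (run ++ [y]) rest
      else run :: pvGroupsB (y - (i : Int)) [y] rest

-- for each group of values emit [values[0], values[-1] + 1]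
def pvFmtB (vals : List Int) : List Int := [vals.headD 0, vals.getLastD 0 + 1]

def divide_into_ranges_alt (ints : List Int) : List (List Int) :=
  match pvEnumFrom 0 ints with
  | [] => []
  | (i, x) :: rest => (pvGroupsB (x - (i : Int)) [x] rest).map pvFmtB

-- ===== PRECONDITION & SPEC =====
def Spec_divide_into_ranges (ints : List Int) (out : List (List Int)) : Prop := out = divide_into_ranges_alt ints
instance (ints : List Int) (out : List (List Int)) : Decidable (Spec_divide_into_ranges ints out) := by unfold Spec_divide_into_ranges; infer_instance

-- ===== CLAIM (what is proved, stated in full; the proofs are below) =====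
def Claim_equal_divide_into_ranges : Prop := ∀ (ints : List Int), Dom_divide_into_ranges ints → Spec_divide_into_ranges ints (divide_into_ranges ints)

-- ===== LEMMAS AND PROOFS =====

-- common reference: process the rest of the list with current range [s, t)
def pvSpecRanges (s t : Int) : List Int → List (List Int)
  | [] => [[s, t]]
  | y :: ys => if y = t then pvSpecRanges s (t + 1) ys else [s, t] :: pvSpecRanges y (y + 1) ys

theorem pvA_loop (xs : List Int) : ∀ (acc : List (List Int)) (s t : Int),
    List.foldl pvStepA (acc ++ [[s, t]]) xs = acc ++ pvSpecRanges s t xs := by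
  induction xs with
  | nil => intro acc s t; simp [pvSpecRanges]
  | cons y ys ih =>
      intro acc s t
      have hlast : (acc ++ [[s, t]]).getLast? = some [s, t] := by simp
      simp only [List.foldl_cons, pvStepA, hlast, pvSpecRanges]
      by_cases h : y = t
      · simpa [pvStepA, h, List.getD, List.dropLast_append_cons] using ih acc s (t + 1)
      · have : (acc ++ [[s, t]]) ++ [[y, y + 1]] = (acc ++ [[s, t]]) ++ [[y, y + 1]] := rfl
        simpa [pvStepA, h, List.getD, List.append_assoc] using ih (acc ++ [[s, t]]) y (y + 1)

theorem pvB_loop (zs : List Int) : ∀ (i : Nat) (k s t : Int) (run : List Int),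
    run ≠ [] → run.headD 0 = s → run.getLastD 0 = t - 1 → k = t - (i : Int) →
    (pvGroupsB k run (pvEnumFrom i zs)).map pvFmtB = pvSpecRanges s t zs := by
  induction zs with
  | nil =>
      intro i k s t run hne hh hl _
      cases run with
      | nil => exact absurd rfl hne
      | cons a as =>
        simp [pvEnumFrom, pvGroupsB, pvSpecRanges, pvFmtB] at *
        constructor
        · exact hh
        · omega
  | cons y ys ih =>
      intro i k s t run hne hh hl hk
      simp only [pvEnumFrom, pvGroupsB, pvSpecRanges]
      by_cases h : y = t
      · have hkey : y - (i : Int) = k := by omega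
        rw [if_pos hkey, if_pos h]
        refine ih (i + 1) k s (t + 1) (run ++ [y]) (by simp) ?_ ?_ (by push_cast; omega)
        · cases run with
          | nil => exact absurd rfl hne
          | cons a as => simpa using hh
        · simp; omega
      · have hkey : ¬ (y - (i : Int) = k) := by omega
        rw [if_neg hkey, if_neg h]
        simp only [List.map_cons]
        have hfmt : pvFmtB run = [s, t] := by
          simp only [pvFmtB]; rw [hh, hl]; norm_num
        rw [hfmt, ih (i + 1) (y - (i : Int)) y (y + 1) [y] (by simp) (by simp) (by simp)
          (by push_cast; omega)]

-- ===== VERDICT (by name: the statement is the Claim_ definition above) =====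
theorem divide_into_ranges_spec : Claim_equal_divide_into_ranges := by
  intro ints _
  unfold Spec_divide_into_ranges divide_into_ranges divide_into_ranges_alt
  cases ints with
  | nil => simp [pvEnumFrom]
  | cons x xs =>
      simp only [pvEnumFrom, List.foldl_cons]
      have hstep : pvStepA [] x = [] ++ [[x, x + 1]] := by simp [pvStepA]
      rw [hstep, pvA_loop xs [] x (x + 1)]
      norm_num
      rw [pvB_loop xs 1 x x (x + 1) [x] (by simp) (by simp) (by simp) (by push_cast; omega)]
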